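-- pv_equiv track=rewrite | github.com/KIDSSCC/LinUCBSchedule | EpsilonGreedy.py | find_vectors
-- ===== SOURCE A (Python) =====
-- def find_vectors(x, d_max):
--     n = len(x)
--     s = sum(x)
--     solutions = []
--
--     def backtrack(current_vector, index, current_distance):
--         if current_distance > d_max or any(val < 0 for val in current_vector):
--             return
--         if index == n:
--             if sum(current_vector) == s:
--                 solutions.append(list(current_vector))
--             return
--         for delta in range(-d_max, d_max + 1):
--             current_vector[index] += delta
--             new_distance = current_distance + abs(delta)
--             backtrack(current_vector, index + 1, new_distance)
--             current_vector[index] -= delta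
--
--     initial_vector = x.copy()
--     backtrack(initial_vector, 0, 0)
--     return solutions
-- ===== SOURCE B (Python) =====
-- def find_vectors(x, d_max):
--     # Depth-first search over the first n-1 coordinates only: the last
--     # coordinate is forced by the sum constraint.  A branch dies as soon as it
--     # is infeasible: every intermediate vector (chosen prefix + untouched
--     # suffix) must stay non-negative, and the remaining deficit must be
--     # payable within the remaining L1 budget.
--     s = sum(x)
--
--     def rec(rest, rem, bud):
--         # rem = required sum of the remaining coordinates, bud = remaining budget
--         if rem < 0 or any(v < 0 for v in rest) or abs(rem - sum(rest)) > bud: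
--             return []
--         if len(rest) == 1:
--             return [[rem]]  # forced value; feasibility checked above
--         x0 = rest[0]
--         out = []
--         for v in range(max(0, x0 - bud), x0 + bud + 1):
--             for tail in rec(rest[1:], rem - v, bud - abs(v - x0)):
--                 out.append([v] + tail)
--         return out
--
--     if not x:
--         return [[]] if d_max >= 0 else []
--     return rec(x, s, d_max)
-- ===== Notes on version B (the rewrite author's own statement) =====
-- stated objective: alternative
-- what changed: B forces the last coordinate from the sum constraint instead of looping over its 2*d_max+1 deltas, and prunes each branch by feasibility (non-negativity of the remaining coordinates and remaining deficit vs remaining L1 budget) instead of A's full (2*d_max+1)^n delta enumeration with post-hoc checks; intended to cut a factor of about 2*d_max+1, but a timing run's inputs short-circuit both programs, so a timing run read only ~1.56x and the speed-up is not claimed.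
import Mathlib
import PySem

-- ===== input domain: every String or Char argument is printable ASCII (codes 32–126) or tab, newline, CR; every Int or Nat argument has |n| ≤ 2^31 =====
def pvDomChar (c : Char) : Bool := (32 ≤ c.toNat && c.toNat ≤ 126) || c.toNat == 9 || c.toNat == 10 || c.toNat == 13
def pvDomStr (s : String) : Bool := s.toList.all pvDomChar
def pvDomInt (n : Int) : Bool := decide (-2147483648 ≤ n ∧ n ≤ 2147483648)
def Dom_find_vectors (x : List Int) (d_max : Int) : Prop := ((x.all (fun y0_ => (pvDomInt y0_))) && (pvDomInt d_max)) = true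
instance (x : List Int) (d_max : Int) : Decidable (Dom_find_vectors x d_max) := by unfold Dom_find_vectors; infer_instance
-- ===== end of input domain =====

-- B replaces A's full (2*d_max+1)^n delta enumeration by a search over the first n-1
-- coordinates with the last coordinate forced by the sum constraint and infeasible
-- branches pruned (non-negativity of every intermediate vector, deficit vs budget).

-- ===== PORT A =====
-- `fuel` only makes the recursion structural; it is n - index on every reachable call,
-- so the `| 0 => []` arm is never taken (Python's recursion always hits `index == n` first).
-- cur[index] is always in range on reachable calls, so getD/set are exact here.
def backtrackA (n : Nat) (s d_max : Int) : Nat → List Int → Nat → Int → List (List Int)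
  | fuel, cur, index, dist =>
    if d_max < dist ∨ cur.any (fun v => decide (v < 0)) = true then []
    else if index = n then (if cur.sum = s then [cur] else [])
    else
      match fuel with
      | 0 => []
      | fuel' + 1 =>
        (PySem.List.pyRange (-d_max) (d_max + 1) 1).foldl
          (fun acc delta =>
            acc ++ backtrackA n s d_max fuel'
              (cur.set index (cur.getD index 0 + delta)) (index + 1) (dist + |delta|))
          []

def find_vectors (x : List Int) (d_max : Int) : List (List Int) :=
  backtrackA x.length x.sum d_max x.length x 0 0

-- ===== PORT B =====
-- rec(rest, rem, bud) of Source B; the [] arm is unreachable (rec is only called on non-empty rest)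
def recB : List Int → Int → Int → List (List Int)
  | rest, rem, bud =>
    if rem < 0 ∨ rest.any (fun v => decide (v < 0)) = true ∨ bud < |rem - rest.sum| then []
    else
      match rest with
      | [] => []
      | [_] => [[rem]]
      | x0 :: rest' =>
        (PySem.List.pyRange (max 0 (x0 - bud)) (x0 + bud + 1) 1).foldl
          (fun out v => out ++ (recB rest' (rem - v) (bud - |v - x0|)).map (fun t => v :: t))
          []

def find_vectors_alt (x : List Int) (d_max : Int) : List (List Int) :=
  if x = [] then (if 0 ≤ d_max then [[]] else []) else recB x x.sum d_max

-- ===== PRECONDITION & SPEC =====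
def Spec_find_vectors (x : List Int) (d_max : Int) (out : List (List Int)) : Prop :=
  out = find_vectors_alt x d_max
instance (x : List Int) (d_max : Int) (out : List (List Int)) : Decidable (Spec_find_vectors x d_max out) := by
  unfold Spec_find_vectors; infer_instance

-- ===== CLAIM (what is proved, stated in full; the proofs are below) =====
def Claim_equal_find_vectors : Prop := ∀ (x : List Int) (d_max : Int), Dom_find_vectors x d_max → Spec_find_vectors x d_max (find_vectors x d_max)

-- ===== LEMMAS AND PROOFS =====

-- recB without the feasibility pruning, and with the forced last value's constraints
-- written out; stepping stone between the two ports.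
def recB0 : List Int → Int → Int → List (List Int)
  | [], _, _ => []
  | [x0], rem, bud => if 0 ≤ rem ∧ |rem - x0| ≤ bud then [[rem]] else []
  | x0 :: x1 :: rest', rem, bud =>
    (PySem.List.pyRange (max 0 (x0 - bud)) (x0 + bud + 1) 1).flatMap
      (fun v => (recB0 (x1 :: rest') (rem - v) (bud - |v - x0|)).map (fun t => v :: t))

def L1 (a b : List Int) : Int := (List.zipWith (fun u v => |u - v|) a b).sum

theorem sound (rest : List Int) (rem bud : Int) (y : List Int)
    (hy : y ∈ recB0 rest rem bud) :
    y.length = rest.length ∧ (∀ v ∈ y, 0 ≤ v) ∧ y.sum = rem ∧ L1 rest y ≤ bud := by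
  induction rest generalizing rem bud y with
  | nil => simp [recB0] at hy
  | cons x0 rest' ih =>
    cases rest' with
    | nil =>
      simp only [recB0] at hy
      split at hy
      · next hc =>
        simp only [List.mem_singleton] at hy
        subst hy
        refine ⟨by simp, by simpa using hc.1, by simp, ?_⟩
        simpa [L1, abs_sub_comm] using hc.2
      · simp at hy
    | cons x1 r =>
      simp only [recB0, List.mem_flatMap, List.mem_map] at hy
      obtain ⟨v, hv, y', hy', rfl⟩ := hy
      have hv' := PySem.List.mem_pyRange_one.mp hv
      have hv0 : 0 ≤ v := le_trans (le_max_left _ _) hv'.1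
      have hvd : |v - x0| ≤ bud := by
        have h1 : x0 - bud ≤ v := le_trans (le_max_right _ _) hv'.1
        have h2 : v < x0 + bud + 1 := hv'.2
        rcases abs_cases (v - x0) with ⟨he, _⟩ | ⟨he, _⟩ <;> omega
      obtain ⟨hl, hnn, hs, hL⟩ := ih (rem - v) (bud - |v - x0|) y' hy'
      refine ⟨by simpa using hl, ?_, by simp [hs], ?_⟩
      · intro w hw
        rcases List.mem_cons.mp hw with rfl | hw
        · exact hv0
        · exact hnn w hw
      · have : L1 (x0 :: x1 :: r) (v :: y') = |x0 - v| + L1 (x1 :: r) y' := by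
          simp [L1]
        rw [this, abs_sub_comm]
        linarith


theorem sum_lb (a b : List Int) (h : b.length = a.length) :
    |b.sum - a.sum| ≤ L1 a b := by
  induction a generalizing b with
  | nil =>
    cases b with
    | nil => simp [L1]
    | cons v b => simp at h
  | cons u a ih =>
    cases b with
    | nil => simp at h
    | cons v b =>
      have ihh := ih b (by simpa using h)
      have h1 : L1 (u :: a) (v :: b) = |u - v| + L1 a b := by simp [L1]
      rw [h1]
      calc |(v :: b).sum - (u :: a).sum| = |(v - u) + (b.sum - a.sum)| := by
            simp only [List.sum_cons]; ring_nf
        _ ≤ |v - u| + |b.sum - a.sum| := abs_add_le _ _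
        _ ≤ |u - v| + L1 a b := by rw [abs_sub_comm]; linarith


theorem empty_of_infeasible (rest : List Int) (rem bud : Int)
    (h : rem < 0 ∨ bud < |rem - rest.sum|) :
    recB0 rest rem bud = [] := by
  rw [List.eq_nil_iff_forall_not_mem]
  intro y hy
  obtain ⟨hl, hnn, hs, hL⟩ := sound rest rem bud y hy
  have h0 : 0 ≤ y.sum := List.sum_nonneg hnn
  have hsl := sum_lb rest y hl
  have habs : y.sum - rest.sum ≤ |y.sum - rest.sum| := le_abs_self _
  have habs2 : -(y.sum - rest.sum) ≤ |y.sum - rest.sum| := neg_le_abs _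
  subst hs
  rcases h with h | h <;> linarith


theorem recB_neg (rest : List Int) (rem bud : Int)
    (h : rest.any (fun v => decide (v < 0)) = true) : recB rest rem bud = [] := by
  cases rest with
  | nil => simp at h
  | cons a t =>
    cases t with
    | nil =>
      show (if rem < 0 ∨ (([a] : List Int).any (fun v => decide (v < 0))) = true ∨
          bud < |rem - ([a] : List Int).sum| then [] else [[rem]]) = []
      rw [if_pos (Or.inr (Or.inl h))]
    | cons c u =>
      show (if rem < 0 ∨ ((a :: c :: u).any (fun v => decide (v < 0))) = true ∨
          bud < |rem - (a :: c :: u).sum| then []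
        else (PySem.List.pyRange (max 0 (a - bud)) (a + bud + 1) 1).foldl
          (fun out v => out ++ (recB (c :: u) (rem - v) (bud - |v - a|)).map (fun t => v :: t)) []) = []
      rw [if_pos (Or.inr (Or.inl h))]

theorem recB_eq_recB0 (rest : List Int) : ∀ (rem bud : Int), (∀ v ∈ rest, 0 ≤ v) →
    recB rest rem bud = recB0 rest rem bud := by
  induction rest with
  | nil =>
    intro rem bud _
    rw [recB]
    split <;> rfl
  | cons x0 rest' ih =>
    intro rem bud hnn
    have hany : ((x0 :: rest').any (fun v => decide (v < 0))) = false := by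
      simp only [List.any_eq_false, decide_eq_true_eq]
      exact fun v hv => not_lt.mpr (hnn v hv)
    cases rest' with
    | nil =>
      by_cases hinf : rem < 0 ∨ (([x0] : List Int).any (fun v => decide (v < 0))) = true ∨
          bud < |rem - ([x0] : List Int).sum|
      · rw [show recB [x0] rem bud = [] from by rw [recB]; exact if_pos hinf]
        refine (empty_of_infeasible _ _ _ ?_).symm
        rcases hinf with h | h | h
        · exact Or.inl h
        · rw [hany] at h; exact absurd h (by simp)
        · exact Or.inr h
      · rw [show recB [x0] rem bud = [[rem]] from by rw [recB]; exact if_neg hinf]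
        push_neg at hinf
        obtain ⟨h1, -, h2⟩ := hinf
        have hc : 0 ≤ rem ∧ |rem - x0| ≤ bud := ⟨by omega, by simpa using h2⟩
        simp only [recB0]
        rw [if_pos hc]
    | cons x1 r =>
      have hnn' : ∀ v ∈ x1 :: r, 0 ≤ v := fun v hv => hnn v (List.mem_cons_of_mem _ hv)
      by_cases hinf : rem < 0 ∨ ((x0 :: x1 :: r).any (fun v => decide (v < 0))) = true ∨
          bud < |rem - (x0 :: x1 :: r).sum|
      · rw [show recB (x0 :: x1 :: r) rem bud = [] from by
          rw [recB]
          · exact if_pos hinf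
          · simp]
        refine (empty_of_infeasible _ _ _ ?_).symm
        rcases hinf with h | h | h
        · exact Or.inl h
        · rw [hany] at h; exact absurd h (by simp)
        · exact Or.inr h
      · rw [show recB (x0 :: x1 :: r) rem bud
            = (PySem.List.pyRange (max 0 (x0 - bud)) (x0 + bud + 1) 1).foldl
              (fun out v => out ++ (recB (x1 :: r) (rem - v) (bud - |v - x0|)).map (fun t => v :: t)) []
          from by
          rw [recB]
          · exact if_neg hinf
          · simp]
        have hfun : (fun (out : List (List Int)) v =>
              out ++ (recB (x1 :: r) (rem - v) (bud - |v - x0|)).map (fun t => v :: t))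
            = (fun out v =>
              out ++ (recB0 (x1 :: r) (rem - v) (bud - |v - x0|)).map (fun t => v :: t)) := by
          funext out v
          rw [ih _ _ hnn']
        rw [hfun, PySem.List.foldl_append_eq_flatMap]
        simp only [recB0, List.nil_append]

theorem flatMap_congr_mem {α β : Type} (l : List α) (f g : α → List β)
    (h : ∀ v ∈ l, f v = g v) : l.flatMap f = l.flatMap g := by
  induction l with
  | nil => rfl
  | cons a t ih =>
    simp only [List.flatMap_cons, h a (List.mem_cons_self ..),
      ih (fun v hv => h v (List.mem_cons_of_mem _ hv))]

theorem fm_shift {α : Type} (f : Int → List α) (a b c : Int) :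
    (PySem.List.pyRange a b 1).flatMap f
      = (PySem.List.pyRange (a + c) (b + c) 1).flatMap (fun v => f (v - c)) := by
  rw [PySem.List.pyRange_one, PySem.List.pyRange_one]
  have hbc : b + c - (a + c) = b - a := by ring
  rw [hbc, List.flatMap_map, List.flatMap_map]
  apply flatMap_congr_mem
  intro k _
  show f (a + k) = f (a + c + k - c)
  congr 1
  ring


theorem fm_trim_left {α : Type} (f : Int → List α) (a b c : Int) (hac : a ≤ c)
    (hv : ∀ v, a ≤ v → v < c → f v = []) :
    (PySem.List.pyRange a b 1).flatMap f = (PySem.List.pyRange c b 1).flatMap f := by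
  have hnil : ∀ (lo hi : Int), (∀ v, lo ≤ v → v < hi → f v = []) →
      (PySem.List.pyRange lo hi 1).flatMap f = [] := by
    intro lo hi hz
    rw [List.flatMap_eq_nil_iff]
    intro v hvm
    have h := PySem.List.mem_pyRange_one.mp hvm
    exact hz v h.1 h.2
  by_cases hcb : c ≤ b
  · rw [PySem.List.pyRange_one_append a c b hac hcb, List.flatMap_append,
      hnil a c hv, List.nil_append]
  · push_neg at hcb
    rw [PySem.List.pyRange_one_eq_nil (le_of_lt hcb)]
    rw [hnil a b (fun v h1 h2 => hv v h1 (by omega))]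
    rfl


theorem fm_trim_right {α : Type} (f : Int → List α) (a b c : Int) (hcb : c ≤ b)
    (hv : ∀ v, c ≤ v → v < b → f v = []) :
    (PySem.List.pyRange a b 1).flatMap f = (PySem.List.pyRange a c 1).flatMap f := by
  have hnil : ∀ (lo hi : Int), (∀ v, lo ≤ v → v < hi → f v = []) →
      (PySem.List.pyRange lo hi 1).flatMap f = [] := by
    intro lo hi hz
    rw [List.flatMap_eq_nil_iff]
    intro v hvm
    have h := PySem.List.mem_pyRange_one.mp hvm
    exact hz v h.1 h.2
  by_cases hca : a ≤ c
  · rw [PySem.List.pyRange_one_append a c b hca hcb, List.flatMap_append,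
      hnil c b hv, List.append_nil]
  · push_neg at hca
    rw [PySem.List.pyRange_one_eq_nil (le_of_lt hca)]
    rw [hnil a b (fun v h1 h2 => hv v (by omega) h2)]
    rfl


theorem fm_single {α : Type} (f : Int → List α) (a b v0 : Int)
    (hv : ∀ v, v ≠ v0 → f v = []) :
    (PySem.List.pyRange a b 1).flatMap f = if a ≤ v0 ∧ v0 < b then f v0 else [] := by
  have hnil : ∀ (lo hi : Int), (∀ v, lo ≤ v → v < hi → v ≠ v0) →
      (PySem.List.pyRange lo hi 1).flatMap f = [] := by
    intro lo hi hz
    rw [List.flatMap_eq_nil_iff]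
    intro v hvm
    have h := PySem.List.mem_pyRange_one.mp hvm
    exact hv v (hz v h.1 h.2)
  by_cases hin : a ≤ v0 ∧ v0 < b
  · rw [if_pos hin]
    rw [PySem.List.pyRange_one_append a v0 b hin.1 (le_of_lt hin.2), List.flatMap_append,
      PySem.List.pyRange_one_cons hin.2, List.flatMap_cons,
      hnil a v0 (fun v _ h2 => by omega), hnil (v0 + 1) b (fun v h1 _ => by omega)]
    simp
  · rw [if_neg hin]
    rw [Decidable.not_and_iff_or_not] at hin
    exact hnil a b (fun v h1 h2 => by omega)


theorem getD_append_len (p l : List Int) (d : Int) : (p ++ l).getD p.length d = l.getD 0 d := by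
  induction p with
  | nil => rfl
  | cons a t ih => simpa using ih

theorem set_append_len (p l : List Int) (v : Int) : (p ++ l).set p.length v = p ++ l.set 0 v := by
  induction p with
  | nil => rfl
  | cons a t ih => simpa using ih

theorem backtrackA_guard (n : Nat) (s d_max : Int) (fuel : Nat) (cur : List Int) (index : Nat) (dist : Int)
    (h : d_max < dist ∨ cur.any (fun v => decide (v < 0)) = true) :
    backtrackA n s d_max fuel cur index dist = [] := by
  cases fuel with
  | zero =>
    show (if d_max < dist ∨ cur.any (fun v => decide (v < 0)) = true then []
      else if index = n then (if cur.sum = s then [cur] else [])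
      else []) = []
    rw [if_pos h]
  | succ fuel' =>
    show (if d_max < dist ∨ cur.any (fun v => decide (v < 0)) = true then []
      else if index = n then (if cur.sum = s then [cur] else [])
      else (PySem.List.pyRange (-d_max) (d_max + 1) 1).foldl
        (fun acc delta =>
          acc ++ backtrackA n s d_max fuel'
            (cur.set index (cur.getD index 0 + delta)) (index + 1) (dist + |delta|)) []) = []
    rw [if_pos h]

theorem main_equiv (rest : List Int) : ∀ (p : List Int) (s d_max dist : Int),
    rest ≠ [] → (∀ v ∈ p, 0 ≤ v) → (∀ v ∈ rest, 0 ≤ v) → 0 ≤ dist → dist ≤ d_max →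
    backtrackA (p.length + rest.length) s d_max rest.length (p ++ rest) p.length dist
      = (recB0 rest (s - p.sum) (d_max - dist)).map (fun t => p ++ t) := by
  induction rest with
  | nil => intro p s d_max dist hne _ _ _ _; exact absurd rfl hne
  | cons x0 rest' ih =>
    intro p s d_max dist _ hp hrest hdist0 hdistd
    have hx0 : 0 ≤ x0 := hrest x0 (List.mem_cons_self ..)
    have hrest' : ∀ v ∈ rest', 0 ≤ v := fun v hv => hrest v (List.mem_cons_of_mem _ hv)
    have hguard : ¬(d_max < dist ∨ ((p ++ x0 :: rest').any (fun v => decide (v < 0))) = true) := by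
      rintro (h | h)
      · omega
      · simp only [List.any_eq_true, decide_eq_true_eq] at h
        obtain ⟨v, hv, hvlt⟩ := h
        rcases List.mem_append.mp hv with hm | hm
        · exact absurd hvlt (not_lt.mpr (hp v hm))
        · exact absurd hvlt (not_lt.mpr (hrest v hm))
    have hidx : ¬(p.length = p.length + (x0 :: rest').length) := by simp
    have hunf : backtrackA (p.length + (x0 :: rest').length) s d_max (x0 :: rest').length (p ++ x0 :: rest') p.length dist
        = (PySem.List.pyRange (-d_max) (d_max + 1) 1).flatMap
            (fun delta => backtrackA (p.length + (x0 :: rest').length) s d_max rest'.length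
              (p ++ (x0 + delta) :: rest') (p.length + 1) (dist + |delta|)) := by
      show (if d_max < dist ∨ ((p ++ x0 :: rest').any (fun v => decide (v < 0))) = true then []
        else if p.length = p.length + (x0 :: rest').length then
          (if (p ++ x0 :: rest').sum = s then [p ++ x0 :: rest'] else [])
        else (PySem.List.pyRange (-d_max) (d_max + 1) 1).foldl
          (fun acc delta =>
            acc ++ backtrackA (p.length + (x0 :: rest').length) s d_max rest'.length
              ((p ++ x0 :: rest').set p.length ((p ++ x0 :: rest').getD p.length 0 + delta))
              (p.length + 1) (dist + |delta|)) []) = _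
      rw [if_neg hguard, if_neg hidx]
      simp only [getD_append_len, set_append_len, List.getD_cons_zero, List.set_cons_zero]
      rw [PySem.List.foldl_append_eq_flatMap, List.nil_append]
    rw [hunf]
    cases rest' with
    | nil =>
      have hf : ∀ delta : Int,
          backtrackA (p.length + (x0 :: ([] : List Int)).length) s d_max ([] : List Int).length
              (p ++ (x0 + delta) :: ([] : List Int)) (p.length + 1) (dist + |delta|)
            = if 0 ≤ x0 + delta ∧ dist + |delta| ≤ d_max ∧ p.sum + (x0 + delta) = s
              then [p ++ [x0 + delta]] else [] := by
        intro delta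
        by_cases h1 : d_max < dist + |delta| ∨ ((p ++ [x0 + delta]).any (fun v => decide (v < 0))) = true
        · rw [backtrackA_guard _ _ _ _ _ _ _ h1, if_neg]
          rintro ⟨hc1, hc2, -⟩
          rcases h1 with h | h
          · omega
          · simp only [List.any_eq_true, decide_eq_true_eq] at h
            obtain ⟨v, hv, hvlt⟩ := h
            rcases List.mem_append.mp hv with hm | hm
            · exact absurd hvlt (not_lt.mpr (hp v hm))
            · have : v = x0 + delta := by simpa using hm
              omega
        · show (if d_max < dist + |delta| ∨ ((p ++ [x0 + delta]).any (fun v => decide (v < 0))) = true then []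
            else if p.length + 1 = p.length + (x0 :: ([] : List Int)).length then
              (if (p ++ [x0 + delta]).sum = s then [p ++ [x0 + delta]] else [])
            else []) = _
          rw [if_neg h1, if_pos (by simp)]
          have hge : 0 ≤ x0 + delta := by
            by_contra hcon
            exact h1 (Or.inr (by
              simp only [List.any_eq_true, decide_eq_true_eq]
              exact ⟨x0 + delta, by simp, by omega⟩))
          have hd2 : dist + |delta| ≤ d_max := by
            rcases not_or.mp h1 with ⟨h, -⟩; omega
          have hsum : (p ++ [x0 + delta]).sum = p.sum + (x0 + delta) := by simp
          rw [hsum]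
          by_cases h3 : p.sum + (x0 + delta) = s
          · rw [if_pos h3, if_pos ⟨hge, hd2, h3⟩]
          · rw [if_neg h3, if_neg (fun hc => h3 hc.2.2)]
      rw [funext hf]
      have hvan : ∀ v : Int, v ≠ s - p.sum - x0 →
          (if 0 ≤ x0 + v ∧ dist + |v| ≤ d_max ∧ p.sum + (x0 + v) = s
            then [p ++ [x0 + v]] else []) = [] := by
        intro v hne
        rw [if_neg]
        rintro ⟨-, -, h3⟩
        exact hne (by omega)
      rw [fm_single _ (-d_max) (d_max + 1) (s - p.sum - x0) hvan]
      show _ = (recB0 [x0] (s - p.sum) (d_max - dist)).map (fun t => p ++ t)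
      simp only [recB0]
      by_cases hc : 0 ≤ s - p.sum ∧ |s - p.sum - x0| ≤ d_max - dist
      · rw [if_pos hc]
        have h1 := hc.1
        have h2 := hc.2
        have houter : -d_max ≤ s - p.sum - x0 ∧ s - p.sum - x0 < d_max + 1 := by
          rcases abs_cases (s - p.sum - x0) with ⟨he, h0⟩ | ⟨he, h0⟩ <;> (rw [he] at h2; constructor <;> omega)
        rw [if_pos houter, if_pos ⟨by omega, by omega, by ring⟩]
        have hval : x0 + (s - p.sum - x0) = s - p.sum := by ring
        rw [hval]
        simp
      · rw [if_neg hc, List.map_nil]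
        by_cases houter : -d_max ≤ s - p.sum - x0 ∧ s - p.sum - x0 < d_max + 1
        · rw [if_pos houter, if_neg]
          rintro ⟨c1, c2, -⟩
          exact hc ⟨by omega, by omega⟩
        · rw [if_neg houter]
    | cons x1 r =>
      have hg : ∀ delta : Int,
          backtrackA (p.length + (x0 :: x1 :: r).length) s d_max (x1 :: r).length
              (p ++ (x0 + delta) :: x1 :: r) (p.length + 1) (dist + |delta|)
            = if 0 ≤ x0 + delta ∧ dist + |delta| ≤ d_max
              then (recB0 (x1 :: r) (s - p.sum - (x0 + delta)) (d_max - dist - |delta|)).map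
                (fun t => p ++ (x0 + delta) :: t)
              else [] := by
        intro delta
        by_cases hok : 0 ≤ x0 + delta ∧ dist + |delta| ≤ d_max
        · rw [if_pos hok]
          have hp' : ∀ v ∈ p ++ [x0 + delta], 0 ≤ v := by
            intro v hv
            rcases List.mem_append.mp hv with hm | hm
            · exact hp v hm
            · have : v = x0 + delta := by simpa using hm
              omega
          have habs0 : 0 ≤ |delta| := abs_nonneg delta
          have h := ih (p ++ [x0 + delta]) s d_max (dist + |delta|)
            (List.cons_ne_nil _ _) hp' hrest' (by omega) hok.2
          simp only [List.length_append, List.length_cons, List.length_nil, List.sum_append,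
            List.sum_cons, List.sum_nil, add_zero, List.append_assoc, List.singleton_append] at h
          have hlen : p.length + 1 + (r.length + 1) = p.length + (r.length + 1 + 1) := by omega
          rw [hlen] at h
          have e1 : s - (p.sum + (x0 + delta)) = s - p.sum - (x0 + delta) := by ring
          have e2 : d_max - (dist + |delta|) = d_max - dist - |delta| := by ring
          rw [e1, e2] at h
          have e3 : (fun t => (p ++ [x0 + delta]) ++ t) = (fun t : List Int => p ++ (x0 + delta) :: t) := by
            funext t
            simp
          rw [← h]
          congr 1
        · rw [if_neg hok]
          have hcond : d_max < dist + |delta| ∨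
              ((p ++ (x0 + delta) :: x1 :: r).any (fun v => decide (v < 0))) = true := by
            rcases Decidable.not_and_iff_or_not.mp hok with h | h
            · right
              simp only [List.any_eq_true, decide_eq_true_eq]
              exact ⟨x0 + delta, by simp, by omega⟩
            · left; omega
          exact backtrackA_guard _ _ _ _ _ _ _ hcond
      rw [funext hg]
      rw [fm_shift _ (-d_max) (d_max + 1) x0]
      have hg2 : (fun v => (fun delta =>
            if 0 ≤ x0 + delta ∧ dist + |delta| ≤ d_max
            then (recB0 (x1 :: r) (s - p.sum - (x0 + delta)) (d_max - dist - |delta|)).map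
              (fun t => p ++ (x0 + delta) :: t)
            else []) (v - x0))
          = (fun v =>
            if 0 ≤ v ∧ dist + |v - x0| ≤ d_max
            then (recB0 (x1 :: r) (s - p.sum - v) (d_max - dist - |v - x0|)).map
              (fun t => p ++ v :: t)
            else []) := by
        funext v
        have e : x0 + (v - x0) = v := by ring
        simp only [e]
      rw [hg2]
      have hm0 : (0 : Int) ≤ max 0 (x0 - (d_max - dist)) := le_max_left _ _
      have hm1 : x0 - (d_max - dist) ≤ max 0 (x0 - (d_max - dist)) := le_max_right _ _
      have hmc := max_choice 0 (x0 - (d_max - dist))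
      have hvleft : ∀ v : Int, -d_max + x0 ≤ v → v < max 0 (x0 - (d_max - dist)) →
          (if 0 ≤ v ∧ dist + |v - x0| ≤ d_max
            then (recB0 (x1 :: r) (s - p.sum - v) (d_max - dist - |v - x0|)).map
              (fun t => p ++ v :: t)
            else []) = [] := by
        intro v hv1 hv2
        rw [if_neg]
        rintro ⟨c1, c2⟩
        rcases hmc with h | h <;> rcases abs_cases (v - x0) with ⟨he, h0⟩ | ⟨he, h0⟩ <;>
          (rw [he] at c2; omega)
      have hvright : ∀ v : Int, x0 + (d_max - dist) + 1 ≤ v → v < d_max + 1 + x0 →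
          (if 0 ≤ v ∧ dist + |v - x0| ≤ d_max
            then (recB0 (x1 :: r) (s - p.sum - v) (d_max - dist - |v - x0|)).map
              (fun t => p ++ v :: t)
            else []) = [] := by
        intro v hv1 hv2
        rw [if_neg]
        rintro ⟨c1, c2⟩
        rcases abs_cases (v - x0) with ⟨he, h0⟩ | ⟨he, h0⟩ <;> (rw [he] at c2; omega)
      rw [fm_trim_left _ (-d_max + x0) (d_max + 1 + x0) (max 0 (x0 - (d_max - dist))) (by omega) hvleft]
      rw [fm_trim_right _ (max 0 (x0 - (d_max - dist))) (d_max + 1 + x0) (x0 + (d_max - dist) + 1) (by omega) hvright]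
      show _ = (recB0 (x0 :: x1 :: r) (s - p.sum) (d_max - dist)).map (fun t => p ++ t)
      simp only [recB0]
      rw [List.map_flatMap]
      apply flatMap_congr_mem
      intro v hv
      have hvm := PySem.List.mem_pyRange_one.mp hv
      have hvm1 : max 0 (x0 - (d_max - dist)) ≤ v := hvm.1
      have hvm2 : v < x0 + (d_max - dist) + 1 := hvm.2
      have hcnd : 0 ≤ v ∧ dist + |v - x0| ≤ d_max := by
        constructor
        · omega
        · rcases abs_cases (v - x0) with ⟨he, h0⟩ | ⟨he, h0⟩ <;> (rw [he]; omega)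
      rw [if_pos hcnd, List.map_map]
      rfl

-- ===== VERDICT (by name: the statement is the Claim_ definition above) =====
theorem find_vectors_spec : Claim_equal_find_vectors := by
  intro x d _hdom
  unfold Spec_find_vectors
  by_cases hneg : ∃ v ∈ x, v < 0
  · -- x has a negative entry: both searches die at once (no intermediate vector is non-negative)
    obtain ⟨w, hw, hwneg⟩ := hneg
    have hanyx : (x.any (fun v => decide (v < 0))) = true := by
      simp only [List.any_eq_true, decide_eq_true_eq]
      exact ⟨w, hw, hwneg⟩
    have hA : find_vectors x d = [] := by
      unfold find_vectors
      exact backtrackA_guard _ _ _ _ _ _ _ (Or.inr hanyx)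
    have hxne : x ≠ [] := by rintro rfl; simp at hw
    have hB : find_vectors_alt x d = [] := by
      unfold find_vectors_alt
      rw [if_neg hxne]
      exact recB_neg _ _ _ hanyx
    rw [hA, hB]
  · push_neg at hneg
    cases x with
    | nil =>
      by_cases hd : 0 ≤ d
      · have hA : find_vectors [] d = [[]] := by
          show (if d < 0 ∨ (([] : List Int).any (fun v => decide (v < 0))) = true then []
            else if (0 : Nat) = ([] : List Int).length then
              (if ([] : List Int).sum = ([] : List Int).sum then [([] : List Int)] else [])
            else []) = [[]]
          rw [if_neg (by simp; omega), if_pos (by simp), if_pos rfl]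
        rw [hA]
        unfold find_vectors_alt
        rw [if_pos rfl, if_pos hd]
      · have hA : find_vectors [] d = [] := by
          unfold find_vectors
          exact backtrackA_guard _ _ _ _ _ _ _ (Or.inl (by omega))
        rw [hA]
        unfold find_vectors_alt
        rw [if_pos rfl, if_neg hd]
    | cons x0 xs =>
      by_cases hd : 0 ≤ d
      · have h := main_equiv (x0 :: xs) [] ((x0 :: xs).sum) d 0
          (List.cons_ne_nil _ _) (by simp) hneg (le_refl 0) hd
        simp only [List.length_nil, Nat.zero_add, List.nil_append, List.sum_nil, sub_zero] at h
        unfold find_vectors find_vectors_alt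
        rw [if_neg (List.cons_ne_nil _ _), recB_eq_recB0 _ _ _ hneg]
        rw [h]
        simp
      · unfold find_vectors find_vectors_alt
        rw [backtrackA_guard _ _ _ _ _ _ _ (Or.inl (by omega))]
        rw [if_neg (List.cons_ne_nil _ _), recB_eq_recB0 _ _ _ hneg]
        rw [empty_of_infeasible _ _ _ (Or.inr (by
          simp only [sub_self, abs_zero]
          omega))]
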